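-- pv_equiv track=rewrite | github.com/Sherewood/haskell | cypher.py | deKebabify
-- ===== SOURCE A (Python) =====
-- def deKebabify(Kword): #turns a kebab-case compliant string into a list of words. This function returns unt as the list of strings
--     if (not Kword): #base case
--         return [""]
--     else: #conditonal.
--         if(Kword[0]!="-"):
--             unt=deKebabify(Kword[1:])
--             unt[0]=Kword[0]+unt[0]
--         else:
--             unt=[""]+deKebabify(Kword[1:])
--
--     return unt
-- ===== SOURCE B (Python) =====
-- def deKebabify(Kword):
--     # iterative: maintain a growing list of words; dash starts a new (empty) word
--     result = [""]
--     for c in Kword: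
--         if c == "-":
--             result.append("")
--         else:
--             result[-1] += c
--     return result
-- ===== Notes on version B (the rewrite author's own statement) =====
-- stated objective: faster
-- what changed: replaces A's recursion (which slices the string and rebuilds the word list back-to-front, prepending each char to the first word) with a single forward loop keeping an accumulator list and extending its last word in place
import Mathlib
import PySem

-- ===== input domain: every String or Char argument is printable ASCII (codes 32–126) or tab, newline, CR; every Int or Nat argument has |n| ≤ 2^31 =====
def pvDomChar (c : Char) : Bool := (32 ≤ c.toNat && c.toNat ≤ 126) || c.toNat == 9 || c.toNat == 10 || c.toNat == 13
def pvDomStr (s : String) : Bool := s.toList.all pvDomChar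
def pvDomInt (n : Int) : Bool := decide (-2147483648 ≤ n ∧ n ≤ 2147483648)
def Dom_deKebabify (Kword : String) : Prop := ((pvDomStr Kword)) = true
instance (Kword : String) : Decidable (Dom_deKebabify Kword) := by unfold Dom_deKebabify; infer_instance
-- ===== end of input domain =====

-- B replaces A's back-to-front recursion with one forward loop growing the last word of an accumulator; equal output on all inputs.

-- ===== PORT A =====
-- A, recursion on the character list; words kept as List Char, turned into String at the end
-- (Python string concatenation 'Kword[0]+unt[0]' ↦ cons on the char list).
def deKebabifyRec : List Char → List (List Char)
  | [] => [[]]                                   -- 'if not Kword: return [""]'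
  | c :: rest =>
    if c ≠ '-' then
      match deKebabifyRec rest with              -- 'unt = deKebabify(Kword[1:]); unt[0] = Kword[0] + unt[0]'
      | [] => []                                 -- unreachable: recursion never returns []
      | u :: us => (c :: u) :: us
    else
      [] :: deKebabifyRec rest                   -- 'unt = [""] + deKebabify(Kword[1:])'

def deKebabify (Kword : String) : List String :=
  (deKebabifyRec Kword.toList).map String.ofList

-- ===== PORT B =====
-- one loop step: dash appends a fresh empty word, otherwise extend the last word ('result[-1] += c')
def deKebabifyStep (acc : List (List Char)) (c : Char) : List (List Char) :=
  if c = '-' then acc ++ [[]]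
  else acc.dropLast ++ [(acc.getLast?.getD []) ++ [c]]

def deKebabify_alt (Kword : String) : List String :=
  (Kword.toList.foldl deKebabifyStep [[]]).map String.ofList

-- ===== PRECONDITION & SPEC =====
def Spec_deKebabify (Kword : String) (out : List String) : Prop := out = deKebabify_alt Kword
instance (Kword : String) (out : List String) : Decidable (Spec_deKebabify Kword out) := by unfold Spec_deKebabify; infer_instance

-- ===== CLAIM (what is proved, stated in full; the proofs are below) =====
def Claim_equal_deKebabify : Prop := ∀ (Kword : String), Dom_deKebabify Kword → Spec_deKebabify Kword (deKebabify Kword)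

-- ===== LEMMAS AND PROOFS =====

theorem deKebabifyRec_ne_nil (cs : List Char) : deKebabifyRec cs ≠ [] := by
  induction cs with
  | nil => simp [deKebabifyRec]
  | cons c rest ih =>
    simp only [deKebabifyRec]
    split
    · cases h : deKebabifyRec rest with
      | nil => exact absurd h ih
      | cons u us => simp
    · simp

-- loop invariant: running B's loop from accumulator pre ++ [w] prepends w to the first word
-- of A's recursive result and keeps pre in front
theorem foldl_step_eq (cs : List Char) : ∀ (pre : List (List Char)) (w : List Char),
    cs.foldl deKebabifyStep (pre ++ [w]) =
      pre ++ (match deKebabifyRec cs with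
              | [] => []
              | u :: us => (w ++ u) :: us) := by
  induction cs with
  | nil => intro pre w; simp [deKebabifyRec]
  | cons c rest ih =>
    intro pre w
    by_cases hc : c = '-'
    · subst hc
      have h1 : deKebabifyStep (pre ++ [w]) '-' = (pre ++ [w]) ++ [[]] := by
        simp [deKebabifyStep]
      simp only [List.foldl_cons, h1]
      rw [ih (pre ++ [w]) []]
      cases h : deKebabifyRec rest with
      | nil => exact absurd h (deKebabifyRec_ne_nil rest)
      | cons u us => simp [deKebabifyRec, h]
    · have h1 : deKebabifyStep (pre ++ [w]) c = pre ++ [w ++ [c]] := by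
        simp [deKebabifyStep, hc]
      simp only [List.foldl_cons, h1]
      rw [ih pre (w ++ [c])]
      cases h : deKebabifyRec rest with
      | nil => exact absurd h (deKebabifyRec_ne_nil rest)
      | cons u us => simp [deKebabifyRec, hc, h]

-- ===== VERDICT (by name: the statement is the Claim_ definition above) =====
theorem deKebabify_spec : Claim_equal_deKebabify := by
  intro Kword _
  unfold Spec_deKebabify deKebabify deKebabify_alt
  have h := foldl_step_eq Kword.toList [] []
  simp only [List.nil_append] at h
  rw [h]
  cases hrec : deKebabifyRec Kword.toList with
  | nil => exact absurd hrec (deKebabifyRec_ne_nil Kword.toList)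
  | cons u us => simp
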